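-- pv_equiv track=rewrite | github.com/EnormousHammer/Canoil-Portal | generate_item_descriptions_list.py | extract_descriptions
-- ===== SOURCE A (Python) =====
-- def extract_descriptions(items):
--     """Extract all item descriptions"""
--     descriptions = []
--     for item in items:
--         description = item.get('Description', '').strip()
--         if description:  # Only add non-empty descriptions
--             descriptions.append(description)
--
--     # Remove duplicates while preserving order
--     seen = set()
--     unique_descriptions = []
--     for desc in descriptions:
--         if desc not in seen:
--             seen.add(desc)
--             unique_descriptions.append(desc)
--
--     return sorted(unique_descriptions)  # Sort alphabetically
-- ===== SOURCE B (Python) =====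
-- def extract_descriptions(items):
--     """Extract all item descriptions"""
--     # Collect non-empty stripped descriptions (duplicates allowed), sort them,
--     # then drop duplicates in one adjacent-comparison pass.
--     stripped = [item.get('Description', '').strip() for item in items]
--     descs = sorted(d for d in stripped if d)
--     out = []
--     prev = None
--     for d in descs:
--         if prev != d:
--             out.append(d)
--             prev = d
--     return out
-- ===== Notes on version B (the rewrite author's own statement) =====
-- stated objective: alternative
-- what changed: Dedup-with-hash-set-then-sort is replaced by sort-first-then-adjacent-dedup: duplicates are removed by comparing each sorted element with the previously kept one, so no set is maintained.
import Mathlib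
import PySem

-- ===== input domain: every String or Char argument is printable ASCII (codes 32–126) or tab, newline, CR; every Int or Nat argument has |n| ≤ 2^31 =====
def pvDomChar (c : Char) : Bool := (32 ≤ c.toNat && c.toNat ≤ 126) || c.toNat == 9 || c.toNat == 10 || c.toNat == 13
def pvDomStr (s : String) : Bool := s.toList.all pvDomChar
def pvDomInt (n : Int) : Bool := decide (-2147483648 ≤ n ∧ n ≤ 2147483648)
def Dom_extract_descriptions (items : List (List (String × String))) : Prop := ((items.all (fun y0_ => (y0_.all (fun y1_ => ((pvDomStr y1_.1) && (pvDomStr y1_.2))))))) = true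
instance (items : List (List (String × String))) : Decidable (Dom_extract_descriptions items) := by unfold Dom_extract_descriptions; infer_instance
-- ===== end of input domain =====

-- B replaces A's ordered hash-set dedup followed by a sort with a sort followed by a
-- single adjacent-comparison dedup pass (objective: alternative; same cost).

-- ===== PORT A =====
def extract_descriptions (items : List (List (String × String))) : List String :=
  let descriptions := items.foldl (fun acc item =>
    let description := PySem.Str.strip ((PySem.Dict.mk item).getD "Description" "")
    if description ≠ "" then acc ++ [description] else acc) []
  let st := descriptions.foldl (fun (st : PySem.Set String × List String) desc =>
    if ¬ PySem.Set.contains st.1 desc then (PySem.Set.add st.1 desc, st.2 ++ [desc]) else st)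
    (PySem.Set.empty, [])
  PySem.List.sorted st.2 (fun x => x) false

-- ===== PORT B =====
def extract_descriptions_alt (items : List (List (String × String))) : List String :=
  let stripped := items.map (fun item => PySem.Str.strip ((PySem.Dict.mk item).getD "Description" ""))
  let descs := PySem.List.sorted (stripped.filter (fun d => d ≠ "")) (fun x => x) false
  let st := descs.foldl (fun (st : List String × Option String) d =>
    if st.2 ≠ some d then (st.1 ++ [d], some d) else st) ([], none)
  st.1

-- ===== PRECONDITION & SPEC =====
def Spec_extract_descriptions (items : List (List (String × String))) (out : List String) : Prop := out = extract_descriptions_alt items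
instance (items : List (List (String × String))) (out : List String) : Decidable (Spec_extract_descriptions items out) := by unfold Spec_extract_descriptions; infer_instance

-- ===== CLAIM (what is proved, stated in full; the proofs are below) =====
def Claim_equal_extract_descriptions : Prop := ∀ (items : List (List (String × String))), Dom_extract_descriptions items → Spec_extract_descriptions items (extract_descriptions items)

-- ===== LEMMAS AND PROOFS =====

-- A's dedup-loop body, named for the proofs (definitionally the lambda in the port of A).
def pvStepA (st : PySem.Set String × List String) (desc : String) : PySem.Set String × List String :=
  if ¬ PySem.Set.contains st.1 desc then (PySem.Set.add st.1 desc, st.2 ++ [desc]) else st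

theorem pvStepA_pair (s : PySem.Set String) (l : List String) (d : String) :
    pvStepA (s, l) d = if d ∈ s then (s, l) else (s ++ [d], l ++ [d]) := by
  unfold pvStepA
  by_cases h : d ∈ s <;> simp [h, PySem.Set.add, PySem.Set.contains]

-- A's dedup loop keeps its seen-set equal to its output list …
theorem pvA_loop_diag (ds : List String) (s : List String) :
    ds.foldl pvStepA (s, s) = (ds.foldl PySem.Set.add s, ds.foldl PySem.Set.add s) := by
  induction ds generalizing s with
  | nil => rfl
  | cons a t ih =>
    simp only [List.foldl_cons, pvStepA_pair]
    by_cases h : a ∈ s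
    · rw [if_pos h, show PySem.Set.add s a = s from by simp [PySem.Set.add, PySem.Set.contains, h]]
      exact ih s
    · rw [if_neg h, show PySem.Set.add s a = s ++ [a] from by simp [PySem.Set.add, PySem.Set.contains, h]]
      exact ih (s ++ [a])

-- … so its output list is exactly set(ds) in first-occurrence order.
theorem pvA_loop (ds : List String) :
    (ds.foldl pvStepA (PySem.Set.empty, [])).2 = PySem.Set.ofList ds := by
  rw [PySem.Set.ofList_eq_foldl]
  exact congrArg Prod.snd (pvA_loop_diag ds [])

-- B's adjacent-dedup-loop body, named for the proofs (definitionally the lambda in the port of B).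
def pvStep (st : List String × Option String) (d : String) : List String × Option String :=
  if st.2 ≠ some d then (st.1 ++ [d], some d) else st

theorem pvStep_pair (acc : List String) (p : Option String) (d : String) :
    pvStep (acc, p) d = if p = some d then (acc, p) else (acc ++ [d], some d) := by
  unfold pvStep
  by_cases h : p = some d <;> simp [h]

def pvAdj (l : List String) (p : Option String) : List String :=
  (l.foldl pvStep ([], p)).1

theorem pvAdj_acc (l : List String) (p : Option String) (acc : List String) :
    (l.foldl pvStep (acc, p)).1 = acc ++ pvAdj l p := by
  induction l generalizing p acc with
  | nil => simp [pvAdj]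
  | cons a t ih =>
    by_cases h : p = some a
    · simp only [List.foldl_cons, pvStep_pair, if_pos h]
      rw [ih p acc]
      congr 1
      simp only [pvAdj, List.foldl_cons, pvStep_pair, if_pos h]
    · simp only [List.foldl_cons, pvStep_pair, if_neg h]
      rw [ih (some a) (acc ++ [a])]
      have hr : pvAdj (a :: t) p = [a] ++ pvAdj t (some a) := by
        simp only [pvAdj, List.foldl_cons, pvStep_pair, if_neg h, List.nil_append]
        exact ih (some a) [a]
      rw [hr, List.append_assoc]

theorem pvAdj_cons_eq (a : String) (t : List String) (p : Option String) (h : p = some a) :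
    pvAdj (a :: t) p = pvAdj t p := by
  simp only [pvAdj, List.foldl_cons, pvStep_pair, if_pos h]

theorem pvAdj_cons_ne (a : String) (t : List String) (p : Option String) (h : p ≠ some a) :
    pvAdj (a :: t) p = a :: pvAdj t (some a) := by
  simp only [pvAdj, List.foldl_cons, pvStep_pair, if_neg h, List.nil_append]
  exact pvAdj_acc t (some a) [a]

-- Membership in the adjacent-dedup of a ≤-sorted list.
theorem pvAdj_mem (l : List String) (p : Option String)
    (hs : l.Pairwise (· ≤ ·)) (hp : ∀ v, p = some v → ∀ x ∈ l, v ≤ x) (x : String) :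
    x ∈ pvAdj l p ↔ x ∈ l ∧ p ≠ some x := by
  induction l generalizing p with
  | nil => simp [pvAdj]
  | cons a t ih =>
    rcases List.pairwise_cons.mp hs with ⟨ha, hst⟩
    have hp' : ∀ v, (some a : Option String) = some v → ∀ x ∈ t, v ≤ x := by
      rintro v hv y hy; cases hv; exact ha y hy
    by_cases h : p = some a
    · rw [pvAdj_cons_eq a t p h, h]
      rw [show pvAdj t (some a) = pvAdj t p from by rw [h]]
      rw [h] at hp ⊢
      rw [ih (some a) hst hp']
      constructor
      · rintro ⟨hxt, hax⟩; exact ⟨List.mem_cons_of_mem _ hxt, hax⟩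
      · rintro ⟨hxl, hpx⟩
        rcases List.mem_cons.mp hxl with rfl | hxt
        · exact absurd rfl hpx
        · exact ⟨hxt, hpx⟩
    · rw [pvAdj_cons_ne a t p h]
      rw [List.mem_cons, ih (some a) hst hp']
      constructor
      · rintro (rfl | ⟨hxt, hax⟩)
        · exact ⟨List.mem_cons_self, fun hpx => h (by simpa using hpx.symm ▸ hpx)⟩
        · refine ⟨List.mem_cons_of_mem _ hxt, ?_⟩
          intro hpx
          have h1 : x ≤ a := hp x hpx a List.mem_cons_self
          have h2 : a ≤ x := ha x hxt
          exact hax (by rw [le_antisymm h2 h1])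
      · rintro ⟨hxl, hpx⟩
        rcases List.mem_cons.mp hxl with rfl | hxt
        · exact Or.inl rfl
        · by_cases hax : a = x
          · exact Or.inl hax.symm
          · exact Or.inr ⟨hxt, by simpa [eq_comm] using hax⟩

-- The adjacent-dedup of a ≤-sorted list is strictly increasing.
theorem pvAdj_pairwise (l : List String) (p : Option String)
    (hs : l.Pairwise (· ≤ ·)) (hp : ∀ v, p = some v → ∀ x ∈ l, v ≤ x) :
    (pvAdj l p).Pairwise (· < ·) := by
  induction l generalizing p with
  | nil => simp [pvAdj]
  | cons a t ih =>
    rcases List.pairwise_cons.mp hs with ⟨ha, hst⟩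
    have hp' : ∀ v, (some a : Option String) = some v → ∀ x ∈ t, v ≤ x := by
      rintro v hv y hy; cases hv; exact ha y hy
    by_cases h : p = some a
    · rw [pvAdj_cons_eq a t p h, show pvAdj t p = pvAdj t (some a) from by rw [h]]
      exact ih (some a) hst hp'
    · rw [pvAdj_cons_ne a t p h]
      refine List.pairwise_cons.mpr ⟨?_, ih (some a) hst hp'⟩
      intro y hy
      rcases (pvAdj_mem t (some a) hst hp' y).mp hy with ⟨hyt, hay⟩
      exact lt_of_le_of_ne (ha y hyt) (by simpa [eq_comm] using hay)

-- ===== VERDICT (by name: the statement is the Claim_ definition above) =====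
theorem extract_descriptions_spec : Claim_equal_extract_descriptions := by
  intro items _
  unfold Spec_extract_descriptions extract_descriptions extract_descriptions_alt
  simp only []
  set f : List (String × String) → String :=
    fun item => PySem.Str.strip ((PySem.Dict.mk item).getD "Description" "") with hf
  -- the collected list of non-empty descriptions is the same on both sides
  have hcol : items.foldl (fun acc item =>
      if f item ≠ "" then acc ++ [f item] else acc) [] =
      (items.map f).filter (fun d => d ≠ "") := by
    rw [PySem.List.foldl_append_ite (fun item => f item ≠ "") f]
    simp [List.filter_map, Function.comp_def]
  set ds : List String := (items.map f).filter (fun d => d ≠ "") with hds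
  rw [hcol]
  -- A's dedup loop yields set(ds)
  rw [show (fun (st : PySem.Set String × List String) desc =>
      if ¬ PySem.Set.contains st.1 desc then (PySem.Set.add st.1 desc, st.2 ++ [desc]) else st)
      = pvStepA from rfl]
  rw [pvA_loop ds]
  -- B's loop is pvAdj over the sorted list
  rw [show (fun (st : List String × Option String) d =>
      if st.2 ≠ some d then (st.1 ++ [d], some d) else st) = pvStep from rfl]
  set sds := PySem.List.sorted ds (fun x => x) false with hsds
  show PySem.List.sorted (PySem.Set.ofList ds) (fun x => x) false = pvAdj sds none
  have hsort : sds.Pairwise (· ≤ ·) := PySem.List.sorted_pairwise ds (fun x => x)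
  have hpnone : ∀ v : String, (none : Option String) = some v → ∀ x ∈ sds, v ≤ x := by
    rintro v hv; cases hv
  have hBmem : ∀ x, x ∈ pvAdj sds none ↔ x ∈ ds := by
    intro x
    rw [pvAdj_mem sds none hsort hpnone x]
    simp [hsds, PySem.List.mem_sorted]
  have hBpw : (pvAdj sds none).Pairwise (· < ·) := pvAdj_pairwise sds none hsort hpnone
  have hBnodup : (pvAdj sds none).Nodup := hBpw.imp ne_of_lt
  have hperm : (pvAdj sds none).Perm (PySem.Set.ofList ds) := by
    rw [List.perm_ext_iff_of_nodup hBnodup (PySem.Set.nodup_ofList ds)]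
    intro x
    rw [hBmem x, PySem.Set.mem_ofList]
  exact PySem.List.sorted_eq_of_perm_of_pairwise_lt (key := fun x : String => x) _ _ hperm hBpw
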